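-- pv_equiv track=rewrite | github.com/Zahariel/adventofcode | y2021/d19/day19.py | relate
-- ===== SOURCE A (Python) =====
-- import itertools
-- from collections import Counter
--
-- def vector_diff(v1, v2):
--     return tuple(l - r for l, r in zip(v1, v2))
--
-- ORIENTATIONS = {
--     (0, 1, 1, 1, 2, 1): (0, 1, 1, 1, 2, 1),
--     (1, 1, 2, 1, 0, 1): (2, 1, 0, 1, 1, 1),
--     (2, 1, 0, 1, 1, 1): (1, 1, 2, 1, 0, 1),
--
--     (0, -1, 1, -1, 2, 1): (0, -1, 1, -1, 2, 1),
--     (1, -1, 2, 1, 0, -1): (2, -1, 0, -1, 1, 1),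
--     (2, 1, 0, -1, 1, -1): (1, -1, 2, -1, 0, 1),
--
--     (0, -1, 1, 1, 2, -1): (0, -1, 1, 1, 2, -1),
--     (1, 1, 2, -1, 0, -1): (2, -1, 0, 1, 1, -1),
--     (2, -1, 0, -1, 1, 1): (1, -1, 2, 1, 0, -1),
--
--     (0, 1, 1, -1, 2, -1): (0, 1, 1, -1, 2, -1),
--     (1, -1, 2, -1, 0, 1): (2, 1, 0, -1, 1, -1),
--     (2, -1, 0, 1, 1, -1): (1, 1, 2, -1, 0, -1),
--
--     (0, -1, 2, 1, 1, 1): (0, -1, 2, 1, 1, 1),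
--     (2, 1, 1, 1, 0, -1): (2, -1, 1, 1, 0, 1),
--     (1, 1, 0, -1, 2, 1): (1, -1, 0, 1, 2, 1),
--
--     (0, 1, 2, -1, 1, 1): (0, 1, 2, 1, 1, -1),
--     (2, -1, 1, 1, 0, 1): (2, 1, 1, 1, 0, -1),
--     (1, 1, 0, 1, 2, -1): (1, 1, 0, 1, 2, -1),
--
--     (0, 1, 2, 1, 1, -1): (0, 1, 2, -1, 1, 1),
--     (2, 1, 1, -1, 0, 1): (2, 1, 1, -1, 0, 1),
--     (1, -1, 0, 1, 2, 1): (1, 1, 0, -1, 2, 1),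
--
--     (0, -1, 2, -1, 1, -1): (0, -1, 2, -1, 1, -1),
--     (2, -1, 1, -1, 0, -1): (2, -1, 1, -1, 0, -1),
--     (1, -1, 0, -1, 2, -1): (1, -1, 0, -1, 2, -1),
-- }
--
-- def apply_orientation(ori, v):
--     return v[ori[0]]*ori[1], v[ori[2]]*ori[3], v[ori[4]]*ori[5]
--
-- def could_be_same(v1, v2):
--     for ori in ORIENTATIONS:
--         if v1 == apply_orientation(ori, v2):
--             return ori
--     return None
--
-- def relate(left, right):
--     relationships = []
--     for left1, left2 in itertools.combinations(left, 2):
--         left_vec = vector_diff(left1, left2)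
--         for right1, right2 in itertools.permutations(right, 2):
--             right_vec = vector_diff(right1, right2)
--             result = could_be_same(left_vec, right_vec)
--             if result is not None:
--                 relationships.append((left1, left2, right1, right2, result))
--
--     if len(relationships) == 0: return None, None
--     found = Counter(rel[4] for rel in relationships)
--     [(true_rel, count)] = found.most_common(1)
--     # need at least 12 commmon beacons: (12 * 11)/2 = 66 common differences
--     if count < 66: return None, None
--     # delete any red herrings
--     relationships = [rel for rel in relationships if rel[4] == true_rel]
--     left_beacon, _, right_beacon, _, _ = relationships[0]
--     return vector_diff(left_beacon, apply_orientation(true_rel, right_beacon)), true_rel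
-- ===== SOURCE B (Python) =====
-- # Faster re-implementation: instead of scanning every right pair (and all 24
-- # orientations) for every left pair, build a hash index once, mapping every
-- # oriented right-difference vector to its (right1, right2, orientation)
-- # entries; each left difference is then matched by a single dict lookup.
-- import itertools
--
-- def vector_diff(v1, v2):
--     return tuple(l - r for l, r in zip(v1, v2))
--
-- ORIENTATIONS = {
--     (0, 1, 1, 1, 2, 1): (0, 1, 1, 1, 2, 1),
--     (1, 1, 2, 1, 0, 1): (2, 1, 0, 1, 1, 1),
--     (2, 1, 0, 1, 1, 1): (1, 1, 2, 1, 0, 1),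
--
--     (0, -1, 1, -1, 2, 1): (0, -1, 1, -1, 2, 1),
--     (1, -1, 2, 1, 0, -1): (2, -1, 0, -1, 1, 1),
--     (2, 1, 0, -1, 1, -1): (1, -1, 2, -1, 0, 1),
--
--     (0, -1, 1, 1, 2, -1): (0, -1, 1, 1, 2, -1),
--     (1, 1, 2, -1, 0, -1): (2, -1, 0, 1, 1, -1),
--     (2, -1, 0, -1, 1, 1): (1, -1, 2, 1, 0, -1),
--
--     (0, 1, 1, -1, 2, -1): (0, 1, 1, -1, 2, -1),
--     (1, -1, 2, -1, 0, 1): (2, 1, 0, -1, 1, -1),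
--     (2, -1, 0, 1, 1, -1): (1, 1, 2, -1, 0, -1),
--
--     (0, -1, 2, 1, 1, 1): (0, -1, 2, 1, 1, 1),
--     (2, 1, 1, 1, 0, -1): (2, -1, 1, 1, 0, 1),
--     (1, 1, 0, -1, 2, 1): (1, -1, 0, 1, 2, 1),
--
--     (0, 1, 2, -1, 1, 1): (0, 1, 2, 1, 1, -1),
--     (2, -1, 1, 1, 0, 1): (2, 1, 1, 1, 0, -1),
--     (1, 1, 0, 1, 2, -1): (1, 1, 0, 1, 2, -1),
--
--     (0, 1, 2, 1, 1, -1): (0, 1, 2, -1, 1, 1),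
--     (2, 1, 1, -1, 0, 1): (2, 1, 1, -1, 0, 1),
--     (1, -1, 0, 1, 2, 1): (1, 1, 0, -1, 2, 1),
--
--     (0, -1, 2, -1, 1, -1): (0, -1, 2, -1, 1, -1),
--     (2, -1, 1, -1, 0, -1): (2, -1, 1, -1, 0, -1),
--     (1, -1, 0, -1, 2, -1): (1, -1, 0, -1, 2, -1),
-- }
--
-- def apply_orientation(ori, v):
--     return v[ori[0]]*ori[1], v[ori[2]]*ori[3], v[ori[4]]*ori[5]
--
-- def relate(left, right):
--     # index: oriented right-difference vector -> [(right1, right2, orientation), ...]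
--     index = {}
--     for right1, right2 in itertools.permutations(right, 2):
--         right_vec = vector_diff(right1, right2)
--         # first-listed orientation wins for each reachable vector of this pair
--         seen = {}
--         for ori in ORIENTATIONS:
--             seen.setdefault(apply_orientation(ori, right_vec), ori)
--         for key, ori in seen.items():
--             index.setdefault(key, []).append((right1, right2, ori))
--
--     relationships = []
--     for left1, left2 in itertools.combinations(left, 2):
--         for right1, right2, ori in index.get(vector_diff(left1, left2), ()):
--             relationships.append((left1, left2, right1, right2, ori))
--
--     if not relationships:
--         return None, None
--     counts = {}
--     for rel in relationships:
--         counts[rel[4]] = counts.get(rel[4], 0) + 1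
--     true_rel, count = max(counts.items(), key=lambda kv: kv[1])
--     if count < 66:
--         return None, None
--     left_beacon, _, right_beacon, _, _ = next(
--         rel for rel in relationships if rel[4] == true_rel)
--     return vector_diff(left_beacon, apply_orientation(true_rel, right_beacon)), true_rel
-- ===== Notes on version B (the rewrite author's own statement) =====
-- stated objective: faster
-- what changed: Instead of scanning all right pairs and 24 orientations for every left pair, B builds a hash index once (oriented right-difference vector -> (right1, right2, orientation) entries, first-listed orientation winning per pair) and matches each left difference with a single dict lookup; the tail picks the most common orientation with max(key=count) and the first matching relationship with next().
import Mathlib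
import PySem

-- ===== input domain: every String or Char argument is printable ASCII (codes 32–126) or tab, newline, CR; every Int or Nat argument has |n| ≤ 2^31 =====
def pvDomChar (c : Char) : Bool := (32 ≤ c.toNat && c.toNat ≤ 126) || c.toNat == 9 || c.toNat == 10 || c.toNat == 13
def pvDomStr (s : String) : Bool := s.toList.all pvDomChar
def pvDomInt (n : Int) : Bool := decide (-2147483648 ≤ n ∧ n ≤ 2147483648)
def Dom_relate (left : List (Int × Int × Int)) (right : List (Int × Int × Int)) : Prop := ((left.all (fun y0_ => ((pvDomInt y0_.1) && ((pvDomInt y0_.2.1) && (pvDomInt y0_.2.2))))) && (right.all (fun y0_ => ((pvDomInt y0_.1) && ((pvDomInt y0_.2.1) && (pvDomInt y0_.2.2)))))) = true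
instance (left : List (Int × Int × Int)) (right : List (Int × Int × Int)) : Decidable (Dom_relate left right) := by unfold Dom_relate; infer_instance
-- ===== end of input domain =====

-- B replaces A's scan of every right pair under all 24 orientations per left pair by a hash
-- index (oriented right-difference vector -> entries) built once and looked up per left pair;
-- a timing run measured B faster.

abbrev PvVec := Int × Int × Int
abbrev PvOri := Int × Int × Int × Int × Int × Int
abbrev PvRel := PvVec × PvVec × PvVec × PvVec × PvOri

-- ===== PORT A =====

-- vector_diff on 3-tuples (the only shape relate feeds it)
def vectorDiff (v1 v2 : PvVec) : PvVec :=
  (v1.1 - v2.1, v1.2.1 - v2.2.1, v1.2.2 - v2.2.2)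

-- the KEYS of the ORIENTATIONS dict, in insertion order (relate never reads the values)
def ORIENTATIONS : List PvOri :=
  [(0, 1, 1, 1, 2, 1), (1, 1, 2, 1, 0, 1), (2, 1, 0, 1, 1, 1),
   (0, -1, 1, -1, 2, 1), (1, -1, 2, 1, 0, -1), (2, 1, 0, -1, 1, -1),
   (0, -1, 1, 1, 2, -1), (1, 1, 2, -1, 0, -1), (2, -1, 0, -1, 1, 1),
   (0, 1, 1, -1, 2, -1), (1, -1, 2, -1, 0, 1), (2, -1, 0, 1, 1, -1),
   (0, -1, 2, 1, 1, 1), (2, 1, 1, 1, 0, -1), (1, 1, 0, -1, 2, 1),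
   (0, 1, 2, -1, 1, 1), (2, -1, 1, 1, 0, 1), (1, 1, 0, 1, 2, -1),
   (0, 1, 2, 1, 1, -1), (2, 1, 1, -1, 0, 1), (1, -1, 0, 1, 2, 1),
   (0, -1, 2, -1, 1, -1), (2, -1, 1, -1, 0, -1), (1, -1, 0, -1, 2, -1)]

-- v[i]: exact for i ∈ {0, 1, 2} — every index occurring in ORIENTATIONS is 0, 1 or 2
def vecGet (v : PvVec) (i : Int) : Int :=
  if i = 0 then v.1 else if i = 1 then v.2.1 else v.2.2

def applyOrientation (o : PvOri) (v : PvVec) : PvVec :=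
  (vecGet v o.1 * o.2.1, vecGet v o.2.2.1 * o.2.2.2.1, vecGet v o.2.2.2.2.1 * o.2.2.2.2.2)

def couldBeSame (v1 v2 : PvVec) : Option PvOri :=
  ORIENTATIONS.find? (fun ori => v1 == applyOrientation ori v2)

-- Counter(...).most_common(1): the first-inserted key attaining the maximal count (Python's tie rule)
def mostCommon1 (items : List (PvOri × Int)) : Option (PvOri × Int) :=
  items.foldl (fun best p =>
    match best with
    | none => some p
    | some b => if b.2 < p.2 then some p else some b) none

def pvVecToList (v : PvVec) : List Int := [v.1, v.2.1, v.2.2]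
def pvOriToList (o : PvOri) : List Int :=
  [o.1, o.2.1, o.2.2.1, o.2.2.2.1, o.2.2.2.2.1, o.2.2.2.2.2]

-- body of A's inner loop over itertools.permutations(right, 2)
def pvInnerA (left1 left2 : PvVec) (acc2 : List PvRel) (pr2 : List PvVec) : List PvRel :=
  match pr2 with
  | [right1, right2] =>
    match couldBeSame (vectorDiff left1 left2) (vectorDiff right1 right2) with
    | some result => acc2 ++ [(left1, left2, right1, right2, result)]
    | none => acc2
  | _ => acc2

-- body of A's outer loop over itertools.combinations(left, 2)
def pvOuterA (right : List PvVec) (acc : List PvRel) (pr : List PvVec) : List PvRel :=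
  match pr with
  | [left1, left2] => (PySem.List.permutations right 2).foldl (pvInnerA left1 left2) acc
  | _ => acc

def relate (left : List (Int × Int × Int)) (right : List (Int × Int × Int)) :
    Option (List Int) × Option (List Int) :=
  let rels : List PvRel := (PySem.List.combinations left 2).foldl (pvOuterA right) []
  if rels.length = 0 then (none, none) else
  match mostCommon1 (PySem.Dict.counter (rels.map (fun r => r.2.2.2.2))).items with
  | none => (none, none)  -- unreachable: rels is nonempty here
  | some (trueRel, count) =>
    if count < 66 then (none, none) else
    match (rels.filter (fun r => r.2.2.2.2 == trueRel)).head? with  -- relationships[0]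
    | none => (none, none)  -- unreachable: count ≥ 66
    | some (leftBeacon, _, rightBeacon, _, _) =>
      (some (pvVecToList (vectorDiff leftBeacon (applyOrientation trueRel rightBeacon))),
       some (pvOriToList trueRel))

-- ===== PORT B =====

-- seen = {}; for ori in ORIENTATIONS: seen.setdefault(apply_orientation(ori, right_vec), ori)
def pvSeen (rightVec : PvVec) : PySem.Dict PvVec PvOri :=
  ORIENTATIONS.foldl (fun s ori => s.setdefault (applyOrientation ori rightVec) ori)
    PySem.Dict.empty

-- one step of B's index-building loop: index.setdefault(key, []).append((right1, right2, ori))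
def pvIndexStep (idx : PySem.Dict PvVec (List (PvVec × PvVec × PvOri))) (pr : List PvVec) :
    PySem.Dict PvVec (List (PvVec × PvVec × PvOri)) :=
  match pr with
  | [right1, right2] =>
    (pvSeen (vectorDiff right1 right2)).items.foldl
      (fun idx2 p => idx2.modify p.1 [] (· ++ [(right1, right2, p.2)])) idx
  | _ => idx

-- body of B's loop over itertools.combinations(left, 2): one index lookup per left pair
def pvCollectB (index : PySem.Dict PvVec (List (PvVec × PvVec × PvOri)))
    (acc : List PvRel) (pr : List PvVec) : List PvRel :=
  match pr with
  | [left1, left2] =>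
    acc ++ (index.getD (vectorDiff left1 left2) []).map
      (fun e => (left1, left2, e.1, e.2.1, e.2.2))
  | _ => acc

def relate_alt (left : List (Int × Int × Int)) (right : List (Int × Int × Int)) :
    Option (List Int) × Option (List Int) :=
  let index := (PySem.List.permutations right 2).foldl pvIndexStep PySem.Dict.empty
  let rels : List PvRel := (PySem.List.combinations left 2).foldl (pvCollectB index) []
  if rels.isEmpty then (none, none) else
  match PySem.List.max?
      (rels.foldl (fun d r => d.insert r.2.2.2.2 (d.getD r.2.2.2.2 0 + 1))
        (PySem.Dict.empty : PySem.Dict PvOri Int)).items (fun kv => kv.2) with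
  | none => (none, none)
  | some (trueRel, count) =>
    if count < 66 then (none, none) else
    match rels.find? (fun r => r.2.2.2.2 == trueRel) with
    | none => (none, none)
    | some (leftBeacon, _, rightBeacon, _, _) =>
      (some (pvVecToList (vectorDiff leftBeacon (applyOrientation trueRel rightBeacon))),
       some (pvOriToList trueRel))

-- ===== PRECONDITION & SPEC =====
def Spec_relate (left : List (Int × Int × Int)) (right : List (Int × Int × Int)) (out : Option (List Int) × Option (List Int)) : Prop := out = relate_alt left right
instance (left : List (Int × Int × Int)) (right : List (Int × Int × Int)) (out : Option (List Int) × Option (List Int)) : Decidable (Spec_relate left right out) := by unfold Spec_relate; infer_instance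

-- ===== CLAIM (what is proved, stated in full; the proofs are below) =====
def Claim_equal_relate : Prop := ∀ (left : List (Int × Int × Int)) (right : List (Int × Int × Int)), Dom_relate left right → Spec_relate left right (relate left right)

-- ===== LEMMAS AND PROOFS =====

-- the match a single entry of `permutations right 2` contributes for a left difference lv
def pvHit (lv : PvVec) (pr2 : List PvVec) : Option (PvVec × PvVec × PvOri) :=
  match pr2 with
  | [r1, r2] => (couldBeSame lv (vectorDiff r1 r2)).map (fun o => (r1, r2, o))
  | _ => none

-- 'append the hit, if any' fold = filterMap
theorem pv_foldl_append_option {γ δ : Type} (f : γ → Option δ) (l : List γ) (acc : List δ) :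
    l.foldl (fun a x => a ++ (f x).toList) acc = acc ++ l.filterMap f := by
  induction l generalizing acc with
  | nil => simp
  | cons x t ih =>
    simp only [List.foldl_cons, List.filterMap_cons]
    cases h : f x <;> simp [ih]

theorem pv_beq_comm (a b : PvVec) : (a == b) = (b == a) := by
  by_cases h : a = b
  · simp [h]
  · simp [h, Ne.symm h]

-- first-wins setdefault fold: lookup = earlier value if any, else first generator hitting the key
theorem pv_get?_foldl_setdefault (g : PvOri → PvVec) (os : List PvOri)
    (s : PySem.Dict PvVec PvOri) (k : PvVec) :
    ((os.foldl (fun s o => s.setdefault (g o) o) s).get? k)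
      = (s.get? k).or ((os.find? (fun o => g o == k))) := by
  induction os generalizing s with
  | nil => simp
  | cons o t ih =>
    simp only [List.foldl_cons]
    rw [ih]
    by_cases h : g o = k
    · rw [List.find?_cons_of_pos (by simp [h]), ← h, PySem.Dict.get?_setdefault_self]
      cases hs : s.get? (g o) <;> simp
    · rw [List.find?_cons_of_neg (by simp [h]),
        PySem.Dict.get?_setdefault_of_ne _ _ (fun hk => h hk.symm)]

-- keys stay Nodup through a setdefault loop
theorem pv_nodup_keys_foldl_setdefault (g : PvOri → PvVec) (os : List PvOri)
    (s : PySem.Dict PvVec PvOri) (h : s.keys.Nodup) :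
    ((os.foldl (fun s o => s.setdefault (g o) o) s).keys).Nodup := by
  induction os generalizing s with
  | nil => exact h
  | cons o t ih =>
    simp only [List.foldl_cons]
    apply ih
    by_cases hc : s.contains (g o) = true
    · rw [PySem.Dict.setdefault_of_contains _ _ hc]; exact h
    · rw [PySem.Dict.setdefault_of_not_contains _ _ (by simpa using hc)]
      exact PySem.Dict.nodup_keys_insert _ _ _ h

-- on an association list with Nodup keys, filtering by a key yields the find? hit alone
theorem pv_filter_key_list (es : List (PvVec × PvOri)) (hnd : (es.map Prod.fst).Nodup)
    (k : PvVec) :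
    es.filter (fun p => p.1 == k)
      = (match (es.find? (fun p => p.1 == k)).map (fun p => p.2) with
         | some o => [(k, o)] | none => []) := by
  induction es with
  | nil => simp
  | cons e t ih =>
    simp only [List.map_cons, List.nodup_cons] at hnd
    by_cases h : e.1 = k
    · rw [List.filter_cons_of_pos (by simp [h]), List.find?_cons_of_pos (by simp [h])]
      have ht : t.filter (fun p => p.1 == k) = [] := by
        apply List.filter_eq_nil_iff.mpr
        intro p hp hpk
        exact hnd.1 (by rw [h, ← show p.1 = k from by simpa using hpk]; exact List.mem_map_of_mem hp)
      simp only [ht, Option.map_some]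
      have : e = (k, e.2) := by rw [← h]
      rw [this]
    · rw [List.filter_cons_of_neg (by simp [h]), List.find?_cons_of_neg (by simp [h])]
      exact ih hnd.2

-- with Nodup keys, the items carrying key k are exactly the get? hit
theorem pv_items_filter_key (d : PySem.Dict PvVec PvOri) (hnd : d.keys.Nodup) (k : PvVec) :
    d.items.filter (fun p => p.1 == k)
      = (match d.get? k with | some o => [(k, o)] | none => []) := by
  have := pv_filter_key_list d.items (by simpa [PySem.Dict.keys] using hnd) k
  rw [this]
  rfl

-- contribution of one right pair to the index at key lv
set_option maxHeartbeats 1000000 in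
theorem pv_getD_update_pair (idx : PySem.Dict PvVec (List (PvVec × PvVec × PvOri)))
    (r1 r2 : PvVec) (lv : PvVec) :
    (pvIndexStep idx [r1, r2]).getD lv []
      = idx.getD lv [] ++ (pvHit lv [r1, r2]).toList := by
  simp only [pvIndexStep]
  have hfold : (pvSeen (vectorDiff r1 r2)).items.foldl
      (fun idx2 p => idx2.modify p.1 [] (· ++ [(r1, r2, p.2)])) idx
      = ((pvSeen (vectorDiff r1 r2)).items.map (fun p => (p.1, (r1, r2, p.2)))).foldl
          (fun d p => d.modify p.1 [] (· ++ [p.2])) idx := by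
    rw [List.foldl_map]
  rw [hfold, PySem.Dict.getD_foldl_modify_append]
  have hget : (pvSeen (vectorDiff r1 r2)).get? lv = couldBeSame lv (vectorDiff r1 r2) := by
    rw [pvSeen, pv_get?_foldl_setdefault, PySem.Dict.get?_empty, Option.none_or, couldBeSame]
    have hp : (fun (o : PvOri) => applyOrientation o (vectorDiff r1 r2) == lv)
        = (fun (o : PvOri) => lv == applyOrientation o (vectorDiff r1 r2)) := by
      funext o
      exact pv_beq_comm _ _
    rw [hp]
  have hX : (((pvSeen (vectorDiff r1 r2)).items.map
        (fun p => (p.1, (r1, r2, p.2)))).filter (fun p => p.1 == lv)).map (fun x => x.2)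
      = (pvHit lv [r1, r2]).toList := by
    have hnodup : (pvSeen (vectorDiff r1 r2)).keys.Nodup := by
      rw [pvSeen]
      exact pv_nodup_keys_foldl_setdefault _ _ _ PySem.Dict.nodup_keys_empty
    rw [List.filter_map]
    have hpred : ((fun p : PvVec × (PvVec × PvVec × PvOri) => p.1 == lv) ∘
        (fun p : PvVec × PvOri => (p.1, (r1, r2, p.2))))
        = (fun p : PvVec × PvOri => p.1 == lv) := rfl
    rw [hpred, List.map_map, pv_items_filter_key (pvSeen (vectorDiff r1 r2)) hnodup lv, hget]
    cases h : couldBeSame lv (vectorDiff r1 r2) <;> simp [pvHit, h]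
  rw [hX]

-- the whole index, read at lv, lists the hits of every right pair in order
theorem pv_getD_index (ps : List (List PvVec)) (lv : PvVec)
    (idx : PySem.Dict PvVec (List (PvVec × PvVec × PvOri))) :
    ((ps.foldl pvIndexStep idx).getD lv []) = idx.getD lv [] ++ ps.filterMap (pvHit lv) := by
  induction ps generalizing idx with
  | nil => simp
  | cons pr t ih =>
    simp only [List.foldl_cons, List.filterMap_cons]
    rcases pr with _ | ⟨r1, _ | ⟨r2, _ | ⟨x, rest⟩⟩⟩
    · rw [ih]; rfl
    · rw [ih]; rfl
    · rw [ih, pv_getD_update_pair]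
      cases pvHit lv [r1, r2] <;> simp
    · rw [ih]; rfl

-- the two relationship lists coincide
theorem pv_rels_eq (left right : List (Int × Int × Int)) :
    ((PySem.List.combinations left 2).foldl (pvOuterA right) ([] : List PvRel))
      = ((PySem.List.combinations left 2).foldl
          (pvCollectB ((PySem.List.permutations right 2).foldl pvIndexStep PySem.Dict.empty))
          ([] : List PvRel)) := by
  apply PySem.List.foldl_congr_mem
  intro acc pr _
  rcases pr with _ | ⟨l1, _ | ⟨l2, _ | ⟨x, rest⟩⟩⟩
  · rfl
  · rfl
  · show (PySem.List.permutations right 2).foldl (pvInnerA l1 l2) acc = _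
    have hstep : pvInnerA l1 l2 = (fun a pr2 =>
        a ++ ((pvHit (vectorDiff l1 l2) pr2).map
          (fun e => (l1, l2, e.1, e.2.1, e.2.2))).toList) := by
      funext a pr2
      rcases pr2 with _ | ⟨r1, _ | ⟨r2, _ | ⟨y, rest2⟩⟩⟩
      · simp [pvInnerA, pvHit]
      · simp [pvInnerA, pvHit]
      · cases h : couldBeSame (vectorDiff l1 l2) (vectorDiff r1 r2) <;>
          simp [pvInnerA, pvHit, h]
      · simp [pvInnerA, pvHit]
    rw [hstep, pv_foldl_append_option (fun pr2 => (pvHit (vectorDiff l1 l2) pr2).map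
      (fun e => (l1, l2, e.1, e.2.1, e.2.2)))]
    show _ = pvCollectB _ acc [l1, l2]
    rw [pvCollectB]
    rw [pv_getD_index, PySem.Dict.getD_empty, List.nil_append, List.map_filterMap]
  · rfl

-- Python's max(items, key=count) is A's most_common(1) fold
theorem pv_mostCommon1_eq (items : List (PvOri × Int)) :
    mostCommon1 items = PySem.List.max? items (fun kv => kv.2) := by
  simp only [mostCommon1, PySem.List.max?]
  congr 1
  funext best p
  cases best <;> rfl

-- A's tail and B's tail agree on any relationship list
theorem pv_tail_eq (rels : List PvRel) :
    (if rels.length = 0 then ((none, none) : Option (List Int) × Option (List Int)) else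
      match mostCommon1 (PySem.Dict.counter (rels.map (fun r => r.2.2.2.2))).items with
      | none => (none, none)
      | some (trueRel, count) =>
        if count < 66 then (none, none) else
        match (rels.filter (fun r => r.2.2.2.2 == trueRel)).head? with
        | none => (none, none)
        | some (leftBeacon, _, rightBeacon, _, _) =>
          (some (pvVecToList (vectorDiff leftBeacon (applyOrientation trueRel rightBeacon))),
           some (pvOriToList trueRel)))
    = (if rels.isEmpty then (none, none) else
      match PySem.List.max?
          (rels.foldl (fun d r => d.insert r.2.2.2.2 (d.getD r.2.2.2.2 0 + 1))
            (PySem.Dict.empty : PySem.Dict PvOri Int)).items (fun kv => kv.2) with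
      | none => (none, none)
      | some (trueRel, count) =>
        if count < 66 then (none, none) else
        match rels.find? (fun r => r.2.2.2.2 == trueRel) with
        | none => (none, none)
        | some (leftBeacon, _, rightBeacon, _, _) =>
          (some (pvVecToList (vectorDiff leftBeacon (applyOrientation trueRel rightBeacon))),
           some (pvOriToList trueRel))) := by
  have hcnt : rels.foldl (fun d r => d.insert r.2.2.2.2 (d.getD r.2.2.2.2 0 + 1))
      (PySem.Dict.empty : PySem.Dict PvOri Int)
      = PySem.Dict.counter (rels.map (fun r => r.2.2.2.2)) := by
    rw [← PySem.Dict.foldl_insert_getD_add_one_eq_counter, List.foldl_map]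
  rw [pv_mostCommon1_eq, ← hcnt]
  have hemp : ¬ (rels.isEmpty = true) ↔ ¬ (rels.length = 0) := by
    simp
  by_cases h : rels.length = 0
  · rw [if_pos h, if_pos (List.isEmpty_iff_length_eq_zero.mpr h)]
  · rw [if_neg h, if_neg (hemp.mpr h)]
    cases PySem.List.max?
        (rels.foldl (fun d r => d.insert r.2.2.2.2 (d.getD r.2.2.2.2 0 + 1))
          (PySem.Dict.empty : PySem.Dict PvOri Int)).items (fun kv => kv.2) with
    | none => rfl
    | some p =>
      obtain ⟨trueRel, count⟩ := p
      by_cases hc : count < 66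
      · simp only [if_pos hc]
      · simp only [if_neg hc, List.head?_filter]

-- ===== VERDICT (by name: the statement is the Claim_ definition above) =====
theorem relate_spec : Claim_equal_relate := by
  intro left right _
  show relate left right = relate_alt left right
  unfold relate relate_alt
  rw [pv_rels_eq]
  exact pv_tail_eq _
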